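-- pv_equiv track=rewrite | github.com/hugoalmx/questoesccalgoritimos | Trabalho/AFN2.PY | mt_comeca_termina_com_a
-- ===== SOURCE A (Python) =====
-- def mt_comeca_termina_com_a(palavra):
--     # Definindo os estados
--     estado = "q0"  # Estado inicial
--
--     if not palavra:
--         return False  # Palavra vazia não pode começar e terminar com 'a'
--
--     # Verificando o primeiro e o último símbolo da palavra
--     for i, simbolo in enumerate(palavra):
--         if estado == "q0":
--             if i == 0:  # Primeira posição da palavra
--                 if simbolo == "a":
--                     estado = "q1"  # Transita para o estado q1 após encontrar 'a' no início
--                 else: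
--                     estado = "q_rejeitado"  # Palavra não começa com 'a', rejeita
--             else:
--                 if simbolo == "a":
--                     estado = "q1"  # Continua em q1 ou vai para q2
--                 elif simbolo == "b":
--                     estado = "q1"  # Permanece em q1 ao encontrar 'b'
--                 else:
--                     estado = "q_rejeitado"  # Caractere inválido, rejeita a palavra
--         elif estado == "q1":
--             if simbolo == "a":
--                 estado = "q2"  # Transita para q2 quando encontra 'a'
--             elif simbolo == "b":
--                 estado = "q1"  # Permanece em q1 ao encontrar 'b'
--             else:
--                 estado = "q_rejeitado"  # Caractere inválido, rejeita a palavra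
--         elif estado == "q2":
--             if simbolo == "a":
--                 estado = "q2"  # Permanece em q2 ao encontrar 'a'
--             elif simbolo == "b":
--                 estado = "q2"  # Permanece em q2 ao encontrar 'b'
--             else:
--                 estado = "q_rejeitado"  # Caractere inválido, rejeita a palavra
--
--         if estado == "q_rejeitado":
--             return False  # A palavra foi rejeitada
--
--     # Aceita a palavra se o último caractere for 'a' (se o estado final for q2)
--     return palavra[-1] == "a" and estado == "q2"
-- ===== SOURCE B (Python) =====
-- def mt_comeca_termina_com_a(palavra):
--     if not palavra:
--         return False
--     return (len(palavra) >= 2 and palavra[0] == "a" and palavra[-1] == "a"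
--             and all(c in ("a", "b") for c in palavra))
-- ===== Notes on version B (the rewrite author's own statement) =====
-- stated objective: simpler
-- what changed: Replaced the explicit DFA state-machine loop with direct boundary predicates: nonempty, length >= 2, first and last characters 'a', and one all() pass validating the alphabet {a,b}.
import Mathlib
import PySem

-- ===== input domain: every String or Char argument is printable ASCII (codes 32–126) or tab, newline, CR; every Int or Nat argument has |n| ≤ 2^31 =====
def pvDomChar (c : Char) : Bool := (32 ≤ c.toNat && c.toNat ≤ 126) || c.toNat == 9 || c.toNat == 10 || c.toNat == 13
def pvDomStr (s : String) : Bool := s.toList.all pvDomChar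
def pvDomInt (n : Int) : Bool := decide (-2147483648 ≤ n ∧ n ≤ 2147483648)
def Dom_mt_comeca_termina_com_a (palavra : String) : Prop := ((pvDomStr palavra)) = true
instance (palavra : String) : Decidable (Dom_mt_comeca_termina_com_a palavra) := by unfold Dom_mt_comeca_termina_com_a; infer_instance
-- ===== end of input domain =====

-- B replaces A's DFA state-machine loop with direct endpoint checks plus one alphabet pass; objective: simpler.

-- ===== PORT A =====
-- one step of A's if/elif chain on (estado, i, simbolo), branches in source order
def pvStepA (estado : String) (i : Nat) (simbolo : Char) : String :=
  if estado = "q0" then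
    if i = 0 then
      (if simbolo = 'a' then "q1" else "q_rejeitado")
    else
      (if simbolo = 'a' then "q1" else if simbolo = 'b' then "q1" else "q_rejeitado")
  else if estado = "q1" then
    (if simbolo = 'a' then "q2" else if simbolo = 'b' then "q1" else "q_rejeitado")
  else if estado = "q2" then
    (if simbolo = 'a' then "q2" else if simbolo = 'b' then "q2" else "q_rejeitado")
  else estado

-- the enumerate loop with its early `return False`; at loop end, A's final return expression
def pvLoopA (palavra : String) : List Char → Nat → String → Bool
  | [], _, estado =>
      (PySem.Str.pyGet? palavra (-1) == some 'a') && (estado == "q2")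
  | simbolo :: rest, i, estado =>
      let estado' := pvStepA estado i simbolo
      if estado' = "q_rejeitado" then false
      else pvLoopA palavra rest (i + 1) estado'

def mt_comeca_termina_com_a (palavra : String) : Bool :=
  if palavra = "" then false
  else pvLoopA palavra palavra.toList 0 "q0"

-- ===== PORT B =====
def mt_comeca_termina_com_a_alt (palavra : String) : Bool :=
  if palavra = "" then false
  else
    decide (2 ≤ PySem.Str.len palavra)
      && (PySem.Str.pyGet? palavra 0 == some 'a')
      && (PySem.Str.pyGet? palavra (-1) == some 'a')
      && palavra.toList.all (fun c => c = 'a' || c = 'b')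

-- ===== PRECONDITION & SPEC =====
def Spec_mt_comeca_termina_com_a (palavra : String) (out : Bool) : Prop := out = mt_comeca_termina_com_a_alt palavra
instance (palavra : String) (out : Bool) : Decidable (Spec_mt_comeca_termina_com_a palavra out) := by unfold Spec_mt_comeca_termina_com_a; infer_instance

-- ===== CLAIM (what is proved, stated in full; the proofs are below) =====
def Claim_equal_mt_comeca_termina_com_a : Prop := ∀ (palavra : String), Dom_mt_comeca_termina_com_a palavra → Spec_mt_comeca_termina_com_a palavra (mt_comeca_termina_com_a palavra)

-- ===== LEMMAS AND PROOFS =====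

-- from state q2 the loop accepts iff the remaining letters are in {a,b} and the word ends in 'a'
theorem pvLoopA_q2 (palavra : String) (rest : List Char) (i : Nat) :
    pvLoopA palavra rest i "q2"
      = (rest.all (fun c => c = 'a' || c = 'b') && (PySem.Str.pyGet? palavra (-1) == some 'a')) := by
  induction rest generalizing i with
  | nil => simp [pvLoopA]
  | cons c cs ih =>
      by_cases ha : c = 'a'
      · simp [pvLoopA, pvStepA, ha, ih]
      · by_cases hb : c = 'b'
        · simp [pvLoopA, pvStepA, hb, ih]
        · simp [pvLoopA, pvStepA, ha, hb]

-- from state q1 the loop accepts iff the rest is all {a,b}, contains an 'a', and the word ends in 'a'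
theorem pvLoopA_q1 (palavra : String) (rest : List Char) (i : Nat) :
    pvLoopA palavra rest i "q1"
      = (rest.all (fun c => c = 'a' || c = 'b') && rest.contains 'a'
          && (PySem.Str.pyGet? palavra (-1) == some 'a')) := by
  induction rest generalizing i with
  | nil => simp [pvLoopA]
  | cons c cs ih =>
      by_cases ha : c = 'a'
      · simp [pvLoopA, pvStepA, ha, pvLoopA_q2]
      · by_cases hb : c = 'b'
        · simp [pvLoopA, pvStepA, hb, ih]
        · simp [pvLoopA, pvStepA, ha, hb]

-- ===== VERDICT(by name: the statement is the Claim_ definition above) =====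
theorem mt_comeca_termina_com_a_spec : Claim_equal_mt_comeca_termina_com_a := by
  intro palavra _
  unfold Spec_mt_comeca_termina_com_a mt_comeca_termina_com_a mt_comeca_termina_com_a_alt
  by_cases hE : palavra = ""
  · simp [hE]
  · rw [if_neg hE, if_neg hE]
    have hL : palavra.toList ≠ [] := by
      simpa [String.toList_eq_nil_iff] using hE
    obtain ⟨c, cs, hcc⟩ := List.exists_cons_of_ne_nil hL
    by_cases ha : c = 'a'
    · subst ha
      rw [hcc,
        show (pvLoopA palavra ('a' :: cs) 0 "q0" : Bool)
            = (if ("q1" : String) = "q_rejeitado" then false else pvLoopA palavra cs 1 "q1")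
          from by simp [pvLoopA, pvStepA],
        if_neg (by decide : ("q1" : String) ≠ "q_rejeitado"), pvLoopA_q1]
      simp only [PySem.Str.len_eq, PySem.Str.pyGet?_eq, hcc, PySem.Chars.pyGet?_eq_listPyGet?,
        PySem.List.pyGet?_zero_cons, PySem.List.pyGet?_neg_one]
      cases cs with
      | nil => simp
      | cons d ds =>
          by_cases hlast : (('a' : Char) :: d :: ds).getLast? = some 'a'
          · have hl2 : (d :: ds).getLast? = some 'a' := by
              rwa [List.getLast?_cons_cons] at hlast
            have hmem : 'a' ∈ d :: ds := List.mem_of_getLast? hl2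
            have hdl : (2 : Int) ≤ (ds.length : Int) + 1 + 1 := by omega
            rcases (by simpa using hmem : 'a' = d ∨ 'a' ∈ ds) with h | h
            · subst h
              simp [hl2, hdl]
            · simp [hl2, hdl, h]
          · have hl2 : (d :: ds).getLast? ≠ some 'a' := by
              rwa [List.getLast?_cons_cons] at hlast
            have hb : ((d :: ds).getLast? == some 'a') = false := by
              simpa using hl2
            simp [hb]
    · rw [hcc,
        show (pvLoopA palavra (c :: cs) 0 "q0" : Bool)
            = (if ("q_rejeitado" : String) = "q_rejeitado" then false
               else pvLoopA palavra cs 1 (pvStepA "q0" 0 c))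
          from by simp [pvLoopA, pvStepA, ha],
        if_pos rfl]
      simp only [PySem.Str.pyGet?_eq, hcc, PySem.Chars.pyGet?_eq_listPyGet?,
        PySem.List.pyGet?_zero_cons]
      simp [ha]
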